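-- pv_equiv track=rewrite | github.com/Shubham-Choudhury/GeeksforGeeks-Problems | 2024 September/Reverse Words/main.py | reverseWords
-- ===== SOURCE A (Python) =====
-- def reverseWords(str):
--     temp = []
--     t = ""
--
--     for i in range(len(str)):
--         if str[i] == ".":
--             temp.append(t)
--             t = ""
--         else:
--             t += str[i]
--         if i == len(str) - 1:
--             temp.append(t)
--
--     ans = ""
--
--     for i in range(len(temp) - 1, -1, -1):
--         ans += temp[i]
--         if i != 0:
--             ans += "."
--
--     return ans
-- ===== SOURCE B (Python) =====
-- def reverseWords(str):
--     # single forward scan: cut off the first word at each '.' and prepend it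
--     # (with its dot) to the answer built back-to-front; no word list is kept
--     ans = ""
--     rest = str
--     i = rest.find('.')
--     while i != -1:
--         ans = '.' + rest[:i] + ans
--         rest = rest[i + 1:]
--         i = rest.find('.')
--     return rest + ans
-- ===== Notes on version B (the rewrite author's own statement) =====
-- stated objective: faster
-- what changed: B replaces A's two-pass scheme (char-by-char split into a word list, then an index loop joining the list backwards) by a single forward scan that repeatedly locates the next dot with str.find, cuts the first word off and prepends it to the answer built back-to-front, keeping no word list.
import Mathlib
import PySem

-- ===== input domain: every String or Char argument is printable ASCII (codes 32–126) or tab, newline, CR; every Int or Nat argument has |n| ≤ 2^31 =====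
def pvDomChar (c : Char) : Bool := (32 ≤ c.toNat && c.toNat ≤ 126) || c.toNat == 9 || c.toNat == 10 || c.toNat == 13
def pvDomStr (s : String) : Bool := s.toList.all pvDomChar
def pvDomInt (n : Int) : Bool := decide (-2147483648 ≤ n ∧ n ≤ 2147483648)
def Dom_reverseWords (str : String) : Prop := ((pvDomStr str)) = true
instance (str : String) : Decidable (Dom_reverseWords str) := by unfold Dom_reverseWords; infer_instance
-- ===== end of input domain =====

-- B reverses the dot-separated word order by one forward scan with find, prepending each word; same value as A.

-- ===== PORT A =====
-- one iteration of A's first loop: split char i off into (temp, t), with the extra append at i = n-1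
def aStep (s : List Char) (n : Int) (st : List (List Char) × List Char) (i : Int) :
    List (List Char) × List Char :=
  let c := PySem.List.pyGetD s i ' '
  let st' := if c = '.' then (st.1 ++ [st.2], ([] : List Char)) else (st.1, st.2 ++ [c])
  if i = n - 1 then (st'.1 ++ [st'.2], st'.2) else st'

def reverseWords (str : String) : String :=
  let s := str.toList
  let n : Int := (s.length : Int)
  let temp := ((PySem.List.pyRange 0 n 1).foldl (aStep s n) ([], [])).1
  let ans := (PySem.List.pyRange ((temp.length : Int) - 1) (-1) (-1)).foldl
    (fun (ans : List Char) i =>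
      let ans := ans ++ PySem.List.pyGetD temp i []
      if i ≠ 0 then ans ++ ['.'] else ans) []
  String.ofList ans

-- ===== PORT B =====
-- facts about rest.find('.') the recursion needs for termination
theorem findDot_nonneg (cs : List Char) (h : PySem.Chars.find cs ['.'] ≠ -1) :
    0 ≤ PySem.Chars.find cs ['.'] := by
  have := PySem.Chars.findFrom_natCast_spec cs ['.'] 0 (Nat.zero_le _)
  rw [Nat.cast_zero, PySem.Chars.findFrom_zero] at this
  exact (this h).1

theorem findDot_lt_length (cs : List Char) (h : PySem.Chars.find cs ['.'] ≠ -1) :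
    (PySem.Chars.find cs ['.']).toNat < cs.length := by
  have := PySem.Chars.findFrom_natCast_spec cs ['.'] 0 (Nat.zero_le _)
  rw [Nat.cast_zero, PySem.Chars.findFrom_zero] at this
  have hpre := (this h).2.1
  by_contra hge
  rw [List.drop_eq_nil_of_le (by omega)] at hpre
  exact (List.cons_ne_nil _ _) (List.prefix_nil.mp hpre)

theorem altGo_dec (cs : List Char) (h : ¬ PySem.Chars.find cs ['.'] = -1) :
    (PySem.List.slice cs (some (PySem.Chars.find cs ['.'] + 1)) none).length < cs.length := by
  have h0 := findDot_nonneg cs h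
  have h1 := findDot_lt_length cs h
  rw [PySem.List.slice_from cs (by omega : (0:Int) ≤ PySem.Chars.find cs ['.'] + 1)]
  rw [List.length_drop]
  omega

-- the while loop of B: state (rest, ans)
def altGo (rest ans : List Char) : List Char :=
  let i := PySem.Chars.find rest ['.']
  if _h : i = -1 then rest ++ ans
  else altGo (PySem.List.slice rest (some (i + 1)) none)
             (('.' :: PySem.List.slice rest none (some i)) ++ ans)
termination_by rest.length
decreasing_by exact altGo_dec rest _h

def reverseWords_alt (str : String) : String :=
  String.ofList (altGo str.toList [])

-- ===== PRECONDITION & SPEC =====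
def Spec_reverseWords (str : String) (out : String) : Prop := out = reverseWords_alt str
instance (str : String) (out : String) : Decidable (Spec_reverseWords str out) := by unfold Spec_reverseWords; infer_instance

-- ===== CLAIM (what is proved, stated in full; the proofs are below) =====
def Claim_equal_reverseWords : Prop := ∀ (str : String), Dom_reverseWords str → Spec_reverseWords str (reverseWords str)

-- ===== LEMMAS AND PROOFS =====

-- canonical split of a char list at '.' (always nonempty; [] splits to [[]])
def splitD : List Char → List (List Char)
  | [] => [[]]
  | c :: t =>
    if c = '.' then [] :: splitD t
    else match splitD t with
         | [] => [[c]]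
         | w :: ws => (c :: w) :: ws

-- canonical "join the words in reverse order with dots"
def joinRev : List (List Char) → List Char
  | [] => []
  | w :: ws => if ws = [] then w else joinRev ws ++ ['.'] ++ w

theorem splitD_ne_nil (cs : List Char) : splitD cs ≠ [] := by
  cases cs with
  | nil => simp [splitD]
  | cons c t =>
    simp only [splitD]
    split
    · simp
    · cases splitD t <;> simp

theorem splitD_append_dot (p : List Char) :
    splitD (p ++ ['.']) = splitD p ++ [[]] := by
  induction p with
  | nil => simp [splitD]
  | cons c t ih =>
    simp only [List.cons_append, splitD, ih]
    split
    · rfl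
    · cases h : splitD t with
      | nil => exact absurd h (splitD_ne_nil t)
      | cons w ws => simp

theorem splitD_append_ne (p : List Char) (c : Char) (hc : c ≠ '.') :
    splitD (p ++ [c]) = (splitD p).dropLast ++ [(splitD p).getLastD [] ++ [c]] := by
  induction p with
  | nil => simp [splitD, hc]
  | cons a t ih =>
    rcases hsp : splitD t with - | ⟨w, ws⟩
    · exact absurd hsp (splitD_ne_nil t)
    · by_cases ha : a = '.'
      · subst ha
        simp only [List.cons_append, splitD, ih, hsp]
        cases ws <;> simp
      · simp only [List.cons_append, splitD, if_neg ha, ih, hsp]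
        cases ws <;> simp

theorem splitD_no_dot (cs : List Char) (h : '.' ∉ cs) : splitD cs = [cs] := by
  induction cs with
  | nil => simp [splitD]
  | cons c t ih =>
    simp only [List.mem_cons, not_or] at h
    simp [splitD, Ne.symm h.1, ih h.2]

theorem splitD_word_dot (w r : List Char) (hw : '.' ∉ w) :
    splitD (w ++ '.' :: r) = w :: splitD r := by
  induction w with
  | nil => simp [splitD]
  | cons c t ih =>
    simp only [List.mem_cons, not_or] at hw
    simp only [List.cons_append, splitD, ih hw.2]
    simp [Ne.symm hw.1]

theorem joinRev_cons (w : List Char) (ws : List (List Char)) (h : ws ≠ []) :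
    joinRev (w :: ws) = joinRev ws ++ ['.'] ++ w := by
  simp [joinRev, h]

theorem joinRev_snoc (ws : List (List Char)) (w : List Char) :
    joinRev (ws ++ [w]) = if ws = [] then w else w ++ ['.'] ++ joinRev ws := by
  induction ws with
  | nil => simp [joinRev]
  | cons v vs ih =>
    have hne : vs ++ [w] ≠ [] := by simp
    rw [List.cons_append, joinRev_cons v (vs ++ [w]) hne, ih]
    by_cases h : vs = []
    · subst h; simp [joinRev]
    · simp only [if_neg h, List.cons_ne_nil]
      rw [joinRev_cons v vs h]
      simp [List.append_assoc]

-- ---- B side ----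
theorem altGo_eq (rest ans : List Char) :
    altGo rest ans = joinRev (splitD rest) ++ ans := by
  induction hn : rest.length using Nat.strong_induction_on generalizing rest ans with
  | _ n ih =>
  subst hn
  rw [altGo]
  by_cases h : PySem.Chars.find rest ['.'] = -1
  · rw [dif_pos h]
    have hno : ¬ ['.'] <:+: rest := by
      have hiff := PySem.Str.find_eq_neg_one_iff (String.ofList rest) (String.ofList ['.'])
      simp only [PySem.Str.find_eq, String.toList_ofList] at hiff
      exact hiff.mp h
    have hnd : '.' ∉ rest := by
      intro hm
      obtain ⟨l, r, hlr⟩ := List.append_of_mem hm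
      exact hno ⟨l, r, by rw [hlr]; simp⟩
    rw [splitD_no_dot rest hnd]
    simp [joinRev]
  · rw [dif_neg h]
    have h0 := findDot_nonneg rest h
    have h1 := findDot_lt_length rest h
    set i := PySem.Chars.find rest ['.'] with hi
    have hspec := PySem.Chars.findFrom_natCast_spec rest ['.'] 0 (Nat.zero_le _)
    rw [Nat.cast_zero, PySem.Chars.findFrom_zero, ← hi] at hspec
    obtain ⟨-, hpre, hmin⟩ := hspec h
    -- rest decomposes as take i ++ '.' :: drop (i+1)
    have hget : rest[i.toNat]'h1 = '.' := by
      obtain ⟨t, ht⟩ := hpre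
      have h2 : List.drop i.toNat rest = '.' :: t := ht.symm
      have h3 := (List.drop_eq_getElem_cons h1).symm.trans h2
      exact (List.cons_eq_cons.mp h3).1
    have hdecomp : rest = List.take i.toNat rest ++ '.' :: List.drop (i.toNat + 1) rest := by
      conv_lhs => rw [← List.take_append_drop i.toNat rest]
      congr 1
      rw [List.drop_eq_getElem_cons (by omega)]
      simp [hget]
    have hnotake : '.' ∉ List.take i.toNat rest := by
      intro hm
      obtain ⟨j, hj, hjeq⟩ := List.getElem_of_mem hm
      have hjlen : j < i.toNat := by simp [List.length_take] at hj; omega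
      refine hmin j (Nat.zero_le _) hjlen ?_
      have : rest[j]'(by omega) = '.' := by
        simpa [List.getElem_take] using hjeq
      refine ⟨List.drop (j + 1) rest, ?_⟩
      conv_rhs => rw [List.drop_eq_getElem_cons (by omega : j < rest.length)]
      simp [this]
    have hslice1 : PySem.List.slice rest (some (i + 1)) none = List.drop (i.toNat + 1) rest := by
      rw [PySem.List.slice_from rest (by omega : (0:Int) ≤ i + 1)]
      congr 1; omega
    have hslice2 : PySem.List.slice rest none (some i) = List.take i.toNat rest := by
      rw [PySem.List.slice_to rest h0]
    rw [hslice1, hslice2]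
    have hlen : (List.drop (i.toNat + 1) rest).length < rest.length := by
      rw [List.length_drop]; omega
    rw [ih _ hlen _ _ rfl]
    conv_rhs => rw [hdecomp]
    rw [splitD_word_dot _ _ hnotake,
        joinRev_cons _ _ (splitD_ne_nil _)]
    simp [List.append_assoc]

-- ---- A side, loop 1 ----
theorem dropLast_concat_getLastD {α : Type} (l : List α) (d : α) (h : l ≠ []) :
    l.dropLast ++ [l.getLastD d] = l := by
  induction l with
  | nil => exact absurd rfl h
  | cons a t ih =>
    cases t with
    | nil => simp
    | cons b u => simpa using ih (by simp)

theorem dropLast_concat_getLast?getD {α : Type} (l : List α) (d : α) (h : l ≠ []) :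
    l.dropLast ++ [l.getLast?.getD d] = l := by
  rw [← List.getLastD_eq_getLast?]
  exact dropLast_concat_getLastD l d h

theorem loop1_inv (s : List Char) (k : Nat) (hk : k < s.length) :
    (PySem.List.pyRange 0 (k : Int) 1).foldl (aStep s (s.length : Int)) ([], []) =
      ((splitD (s.take k)).dropLast, (splitD (s.take k)).getLastD []) := by
  induction k with
  | zero => simp [PySem.List.pyRange_one_eq_nil, splitD]
  | succ k ihk =>
    have hk' : k < s.length := by omega
    have hrange : PySem.List.pyRange 0 ((k : Int) + 1) 1 =
        PySem.List.pyRange 0 (k : Int) 1 ++ [(k : Int)] := by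
      exact PySem.List.pyRange_one_succ_right (by positivity)
    push_cast
    rw [hrange, List.foldl_append, ihk hk']
    simp only [List.foldl_cons, List.foldl_nil]
    rw [aStep]
    have hne : (k : Int) = (s.length : Int) - 1 ↔ False := by
      constructor <;> intro h
      · omega
      · exact h.elim
    simp only [PySem.List.pyGetD_natCast, hne, if_false]
    have htake : s.take (k + 1) = s.take k ++ [s[k]'hk'] := by
      rw [List.take_add_one, List.getElem?_eq_getElem hk']
      rfl
    rw [htake]
    by_cases hc : s[k]'hk' = '.'
    · rw [hc, splitD_append_dot]
      simp [List.getElem?_eq_getElem hk', hc]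
      exact dropLast_concat_getLast?getD _ [] (splitD_ne_nil _)
    · rw [splitD_append_ne _ _ hc]
      simp [List.getElem?_eq_getElem hk', hc]

theorem loop1_final (s : List Char) (h : s ≠ []) :
    ((PySem.List.pyRange 0 (s.length : Int) 1).foldl (aStep s (s.length : Int)) ([], [])).1 =
      splitD s := by
  obtain ⟨m, hm⟩ : ∃ m, s.length = m + 1 :=
    ⟨s.length - 1, by have := List.length_pos_iff.mpr h; omega⟩
  have hrange : PySem.List.pyRange 0 (s.length : Int) 1 =
      PySem.List.pyRange 0 (m : Int) 1 ++ [(m : Int)] := by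
    rw [hm]; push_cast
    exact PySem.List.pyRange_one_succ_right (by positivity)
  rw [hrange, List.foldl_append, loop1_inv s m (by omega)]
  simp only [List.foldl_cons, List.foldl_nil]
  rw [aStep]
  have hlast : ((s.length : Int) - 1) = (m : Int) := by rw [hm]; push_cast; ring
  rw [hlast]
  have hmlt : m < s.length := by omega
  have hs : s.take m ++ [s[m]'hmlt] = s := by
    have h2 := List.take_add_one (l := s) (i := m)
    rw [List.getElem?_eq_getElem hmlt] at h2
    simp only [Option.toList_some] at h2
    rw [← h2, ← hm, List.take_length]
  by_cases hc : s[m]'hmlt = '.'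
  · conv_rhs => rw [← hs]
    rw [hc, splitD_append_dot]
    have hkey := dropLast_concat_getLast?getD (splitD (s.take m)) [] (splitD_ne_nil _)
    simp [PySem.List.pyGetD_natCast, List.getElem?_eq_getElem hmlt, hc]
    conv_rhs => rw [← hkey]
    simp
  · conv_rhs => rw [← hs]
    rw [splitD_append_ne _ _ hc]
    simp [PySem.List.pyGetD_natCast, List.getElem?_eq_getElem hmlt, hc]

-- ---- A side, loop 2 ----
theorem loop2_eq (temp : List (List Char)) (ans0 : List Char) :
    (PySem.List.pyRange ((temp.length : Int) - 1) (-1) (-1)).foldl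
      (fun (ans : List Char) i =>
        let ans := ans ++ PySem.List.pyGetD temp i []
        if i ≠ 0 then ans ++ ['.'] else ans) ans0
    = ans0 ++ joinRev temp := by
  induction temp using List.reverseRecOn generalizing ans0 with
  | nil => simp [PySem.List.pyRange_neg_one_eq_nil, joinRev]
  | append_singleton ws w ih =>
    have hlen : ((ws ++ [w]).length : Int) - 1 = (ws.length : Int) := by
      simp
    rw [hlen, PySem.List.pyRange_neg_one_cons (by omega : (-1 : Int) < (ws.length : Int))]
    simp only [List.foldl_cons]
    have hget : PySem.List.pyGetD (ws ++ [w]) (ws.length : Int) [] = w := by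
      rw [PySem.List.pyGetD_natCast]
      simp
    have hcongr : (PySem.List.pyRange ((ws.length : Int) - 1) (-1) (-1)).foldl
        (fun (ans : List Char) i =>
          let ans := ans ++ PySem.List.pyGetD (ws ++ [w]) i []
          if i ≠ 0 then ans ++ ['.'] else ans)
        (if (ws.length : Int) ≠ 0 then ans0 ++ w ++ ['.'] else ans0 ++ w)
      = (PySem.List.pyRange ((ws.length : Int) - 1) (-1) (-1)).foldl
        (fun (ans : List Char) i =>
          let ans := ans ++ PySem.List.pyGetD ws i []
          if i ≠ 0 then ans ++ ['.'] else ans)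
        (if (ws.length : Int) ≠ 0 then ans0 ++ w ++ ['.'] else ans0 ++ w) := by
      apply PySem.List.foldl_congr_mem
      intro acc x hx
      have hx' := (PySem.List.mem_pyRange_neg_one).mp hx
      have hx0 : 0 ≤ x := by omega
      have hxlt : x.toNat < ws.length := by omega
      have : PySem.List.pyGetD (ws ++ [w]) x [] = PySem.List.pyGetD ws x [] := by
        obtain ⟨xn, rfl⟩ := Int.eq_ofNat_of_zero_le hx0
        rw [PySem.List.pyGetD_natCast, PySem.List.pyGetD_natCast]
        rw [List.getD_append]
        simpa using hxlt
      simp [this]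
    rw [hget, hcongr, ih, joinRev_snoc]
    by_cases h : ws = []
    · subst h; simp [joinRev]
    · have hne0 : (ws.length : Int) ≠ 0 := by
        intro hh
        exact h (List.length_eq_zero_iff.mp (by exact_mod_cast hh))
      simp only [if_neg h, if_pos hne0]
      simp [List.append_assoc]

-- ---- assembling ----
theorem reverseWords_eq_canonical (str : String) :
    reverseWords str = String.ofList (joinRev (splitD str.toList)) := by
  rw [reverseWords]
  by_cases h : str.toList = []
  · rw [h]
    simp only [List.length_nil, Nat.cast_zero]
    rw [PySem.List.pyRange_one_eq_nil (by omega)]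
    simp [splitD, joinRev]
  · simp only []
    rw [loop1_final str.toList h, loop2_eq]
    simp

theorem reverseWords_alt_eq_canonical (str : String) :
    reverseWords_alt str = String.ofList (joinRev (splitD str.toList)) := by
  rw [reverseWords_alt, altGo_eq]
  simp

-- ===== VERDICT (by name: the statement is the Claim_ definition above) =====
theorem reverseWords_spec : Claim_equal_reverseWords := by
  intro str _
  unfold Spec_reverseWords
  rw [reverseWords_eq_canonical, reverseWords_alt_eq_canonical]
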